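-- pv_equiv track=rewrite | github.com/datwatikmaak/fluffy-octo-happiness | 29/wrong_char.py | get_index_different_char
-- ===== SOURCE A (Python) =====
-- ALPHANUMERIC = list("abcdefghijklmnopqrstuvwxyzABCDEFGHIJKLMNOPQRSTUVWXYZ0123456789")
--
-- def get_index_different_char(chars):
--     check_list = []
--     for char in chars:
--         if str(char) in ALPHANUMERIC:
--             check_list.append("+")
--         else:
--             check_list.append("-")
--
--     number_of_alpha_char = check_list.count("+")
--     number_of_non_alpha_char = check_list.count("-")
--
--     if number_of_alpha_char == 1:
--         for i in check_list:
--             if i == "+":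
--                 return check_list.index("+")
--
--     if number_of_non_alpha_char == 1:
--         for i in check_list:
--             if i == "-":
--                 return check_list.index("-")
-- ===== SOURCE B (Python) =====
-- ALNUM_SET = set("abcdefghijklmnopqrstuvwxyzABCDEFGHIJKLMNOPQRSTUVWXYZ0123456789")
--
-- def get_index_different_char(chars):
--     # one backward scan keeping, per class, a count capped at 2 and the first index
--     a = o = 0
--     ai = oi = -1
--     for i in range(len(chars) - 1, -1, -1):
--         if str(chars[i]) in ALNUM_SET:
--             a, ai = min(a + 1, 2), i
--         else:
--             o, oi = min(o + 1, 2), i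
--     if a == 1:
--         return ai
--     if o == 1:
--         return oi
--     return None
-- ===== Notes on version B (the rewrite author's own statement) =====
-- stated objective: simpler
-- what changed: A single backward scan maintains O(1) state (a count capped at 2 and the first index per class) instead of A's materialised '+'/'-' symbol list with two .count passes and rescanning .index loops; the final answer is read off the summary.
import Mathlib
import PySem

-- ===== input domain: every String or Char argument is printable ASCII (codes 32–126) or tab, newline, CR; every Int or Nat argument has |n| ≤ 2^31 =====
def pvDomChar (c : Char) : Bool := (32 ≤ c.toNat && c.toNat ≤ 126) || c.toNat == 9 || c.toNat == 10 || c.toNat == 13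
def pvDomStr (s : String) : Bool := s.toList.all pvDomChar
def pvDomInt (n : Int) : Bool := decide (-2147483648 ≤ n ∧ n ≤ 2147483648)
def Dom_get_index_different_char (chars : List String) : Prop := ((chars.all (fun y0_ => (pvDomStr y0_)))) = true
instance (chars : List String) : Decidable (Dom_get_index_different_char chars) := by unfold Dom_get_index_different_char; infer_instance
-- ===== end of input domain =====

-- B replaces A's symbol list, its two .count passes and its rescanning .index loops by a
-- single backward scan keeping only a capped-at-2 count and a first index per class (objective: simpler).

-- ===== PORT A =====
-- ALPHANUMERIC = list("abc…789"): the 62 one-character strings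
def pvAlnum : List String :=
  "abcdefghijklmnopqrstuvwxyzABCDEFGHIJKLMNOPQRSTUVWXYZ0123456789".toList.map
    (fun c => String.ofList [c])

-- 'for i in check_list: if i == target: return check_list.index(target)'
def pvScanA (full : List String) (target : String) : List String → Option Int
  | [] => none
  | i :: rest =>
    if i == target then (PySem.List.index? full target).map (fun n => (n : Int))
    else pvScanA full target rest

def get_index_different_char (chars : List String) : Option Int :=
  let check := chars.foldl
    (fun acc c => acc ++ [if pvAlnum.contains c then "+" else "-"]) []
  let na := PySem.List.count check "+"
  let nn := PySem.List.count check "-"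
  match (if na == 1 then pvScanA check "+" check else none) with
  | some r => some r
  | none => if nn == 1 then pvScanA check "-" check else none

-- ===== PORT B =====
-- ALNUM_SET = set("abc…789")
def pvAlnumSet : PySem.Set String := PySem.Set.ofList pvAlnum

-- Source B's backward index loop 'for i in range(len(chars)-1, -1, -1)', ported as the
-- structural recursion that performs the same state updates in the same right-to-left
-- order: state = (a, ai, o, oi), counts capped at 2, first index per class (-1 = unset)
def pvSummary : List String → Int → Int × Int × Int × Int
  | [], _ => (0, -1, 0, -1)
  | c :: cs, i =>
    let s := pvSummary cs (i + 1)
    if PySem.Set.contains pvAlnumSet c then (min (s.1 + 1) 2, i, s.2.2.1, s.2.2.2)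
    else (s.1, s.2.1, min (s.2.2.1 + 1) 2, i)

def get_index_different_char_alt (chars : List String) : Option Int :=
  let s := pvSummary chars 0
  if s.1 == 1 then some s.2.1
  else if s.2.2.1 == 1 then some s.2.2.2
  else none

-- ===== PRECONDITION & SPEC =====
def Spec_get_index_different_char (chars : List String) (out : Option Int) : Prop := out = get_index_different_char_alt chars
instance (chars : List String) (out : Option Int) : Decidable (Spec_get_index_different_char chars out) := by unfold Spec_get_index_different_char; infer_instance

-- ===== CLAIM (what is proved, stated in full; the proofs are below) =====
def Claim_equal_get_index_different_char : Prop := ∀ (chars : List String), Dom_get_index_different_char chars → Spec_get_index_different_char chars (get_index_different_char chars)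

-- ===== LEMMAS AND PROOFS =====

def pvP (c : String) : Bool := pvAlnum.contains c

def pvFIdx (q : String → Bool) (chars : List String) (n : Int) : Int :=
  match chars.findIdx? q with
  | none => -1
  | some k => n + k

theorem contains_alnumSet (x : String) : PySem.Set.contains pvAlnumSet x = pvAlnum.contains x := by
  rw [Bool.eq_iff_iff]
  simp [pvAlnumSet, PySem.Set.contains, PySem.Set.mem_ofList]

-- the backward-scan summary computes capped class counts and first class indices
theorem pvSummary_spec : ∀ (chars : List String) (n : Int),
    pvSummary chars n =
      (min ((chars.countP pvP : Int)) 2, pvFIdx pvP chars n,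
       min ((chars.countP (fun c => !pvP c) : Int)) 2, pvFIdx (fun c => !pvP c) chars n) := by
  intro chars
  induction chars with
  | nil => intro n; simp [pvSummary, pvFIdx]
  | cons c cs ih =>
    intro n
    rw [pvSummary, ih (n + 1), contains_alnumSet]
    by_cases hc : pvP c
    · have h1 : (List.countP pvP (c :: cs) : Int) = (List.countP pvP cs : Int) + 1 := by
        rw [List.countP_cons, if_pos hc]; push_cast; ring
      have h2 : List.countP (fun c => !pvP c) (c :: cs) = List.countP (fun c => !pvP c) cs := by
        rw [List.countP_cons]; simp [hc]
      have h3 : pvFIdx pvP (c :: cs) n = n := by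
        unfold pvFIdx; rw [List.findIdx?_cons, if_pos hc]; simp
      have h4 : pvFIdx (fun c => !pvP c) (c :: cs) n = pvFIdx (fun c => !pvP c) cs (n + 1) := by
        unfold pvFIdx; rw [List.findIdx?_cons]
        simp only [hc, Bool.not_true, Bool.false_eq_true, if_false]
        cases h : cs.findIdx? (fun c => !pvP c) with
        | none => simp
        | some k => simp; omega
      rw [show pvAlnum.contains c = true from hc, if_pos rfl, h1, h2, h3, h4]
      have : min (min ((List.countP pvP cs : Int)) 2 + 1) 2 = min ((List.countP pvP cs : Int) + 1) 2 := by
        have : (0 : Int) ≤ (List.countP pvP cs : Int) := Int.natCast_nonneg _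
        omega
      rw [this]
    · have hc' : pvP c = false := eq_false_of_ne_true hc
      have h1 : List.countP pvP (c :: cs) = List.countP pvP cs := by
        rw [List.countP_cons]; simp [hc']
      have h2 : (List.countP (fun c => !pvP c) (c :: cs) : Int) = (List.countP (fun c => !pvP c) cs : Int) + 1 := by
        rw [List.countP_cons]; simp [hc']
      have h3 : pvFIdx pvP (c :: cs) n = pvFIdx pvP cs (n + 1) := by
        unfold pvFIdx; rw [List.findIdx?_cons, if_neg hc]
        cases h : cs.findIdx? pvP with
        | none => simp
        | some k => simp; omega
      have h4 : pvFIdx (fun c => !pvP c) (c :: cs) n = n := by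
        unfold pvFIdx; rw [List.findIdx?_cons]
        simp [hc']
      rw [show pvAlnum.contains c = false from hc', if_neg (by simp), h1, h2, h3, h4]
      have : min (min ((List.countP (fun c => !pvP c) cs : Int)) 2 + 1) 2
          = min ((List.countP (fun c => !pvP c) cs : Int) + 1) 2 := by
        have : (0 : Int) ≤ (List.countP (fun c => !pvP c) cs : Int) := Int.natCast_nonneg _
        omega
      rw [this]

theorem count_check (p q : String → Bool) (t : String)
    (h : ∀ c, ((if p c then "+" else "-") == t) = q c) :
    ∀ chars : List String,
    PySem.List.count (chars.map (fun c => if p c then "+" else "-")) t = chars.countP q := by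
  intro chars
  induction chars with
  | nil => simp [PySem.List.count_eq]
  | cons c cs ih =>
    rw [PySem.List.count_eq] at ih ⊢
    rw [List.map_cons, List.count_cons, List.countP_cons, ih, h c]

theorem pvScanA_eq (full : List String) (t : String) :
    ∀ l : List String, pvScanA full t l =
      if t ∈ l then (PySem.List.index? full t).map (fun n => (n : Int)) else none := by
  intro l
  induction l with
  | nil => simp [pvScanA]
  | cons x xs ih =>
    by_cases h : x = t
    · simp [pvScanA, h]
    · have h' : ¬ t = x := fun e => h e.symm
      simp [pvScanA, h, ih, h']

theorem index?_map_check (p q : String → Bool) (t : String)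
    (h : ∀ c, ((if p c then "+" else "-") == t) = q c) (chars : List String) :
    PySem.List.index? (chars.map (fun c => if p c then "+" else "-")) t = chars.findIdx? q := by
  rw [PySem.List.index?_eq_idxOf?]
  induction chars with
  | nil => simp
  | cons c cs ih =>
    rw [List.map_cons, List.idxOf?_cons, List.findIdx?_cons]
    have hc := h c
    by_cases hq : q c = true
    · rw [hq] at hc; simp [hc, hq]
    · have hq' : q c = false := eq_false_of_ne_true hq
      rw [hq'] at hc
      simp only [hc, Bool.false_eq_true, if_false, hq']
      rw [ih]

theorem hbeq_plus : ∀ c, ((if pvAlnum.contains c then "+" else "-") == "+") = pvP c := by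
  intro c; by_cases hc : c ∈ pvAlnum <;> simp [hc, pvP]

theorem hbeq_minus : ∀ c, ((if pvAlnum.contains c then "+" else "-") == "-") = !pvP c := by
  intro c; by_cases hc : c ∈ pvAlnum <;> simp [hc, pvP]

-- ===== VERDICT (by name: the statement is the Claim_ definition above) =====
theorem get_index_different_char_spec : Claim_equal_get_index_different_char := by
  intro chars _
  unfold Spec_get_index_different_char get_index_different_char get_index_different_char_alt
  simp only [PySem.List.foldl_append_singleton_eq_map, List.nil_append,
    count_check _ _ _ hbeq_plus chars, count_check _ _ _ hbeq_minus chars,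
    pvSummary_spec chars 0]
  by_cases h1 : chars.countP pvP = 1
  · -- exactly one alphanumeric entry: both return its index
    have hex : ∃ k, chars.findIdx? pvP = some k := by
      rcases (List.countP_pos_iff (p := pvP) (l := chars)).mp (by omega) with ⟨c, hc, hpc⟩
      have hs : (chars.findIdx? pvP).isSome := by
        rw [List.findIdx?_isSome]; exact List.any_eq_true.mpr ⟨c, hc, hpc⟩
      exact Option.isSome_iff_exists.mp hs
    obtain ⟨k, hk⟩ := hex
    have hmem : "+" ∈ chars.map (fun c => if pvAlnum.contains c then "+" else "-") := by
      have h0 : 0 < List.count "+" (chars.map (fun c => if pvAlnum.contains c then "+" else "-")) := by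
        rw [← PySem.List.count_eq, count_check _ _ _ hbeq_plus chars, h1]; norm_num
      exact List.count_pos_iff.mp h0
    rw [pvScanA_eq, if_pos hmem, index?_map_check _ _ _ hbeq_plus chars, hk]
    simp [h1, pvFIdx, hk]
  · have hmin1 : (min ((chars.countP pvP : Int)) 2 == 1) = false := by
      simp only [beq_eq_false_iff_ne, ne_eq]
      omega
    have hne1 : (chars.countP pvP == 1) = false := by simpa using h1
    by_cases h2 : chars.countP (fun c => !pvP c) = 1
    · -- exactly one non-alphanumeric entry
      have hex : ∃ k, chars.findIdx? (fun c => !pvP c) = some k := by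
        rcases (List.countP_pos_iff (p := fun c => !pvP c) (l := chars)).mp (by omega) with ⟨c, hc, hpc⟩
        have hs : (chars.findIdx? (fun c => !pvP c)).isSome := by
          rw [List.findIdx?_isSome]; exact List.any_eq_true.mpr ⟨c, hc, hpc⟩
        exact Option.isSome_iff_exists.mp hs
      obtain ⟨k, hk⟩ := hex
      have hmem : "-" ∈ chars.map (fun c => if pvAlnum.contains c then "+" else "-") := by
        have h0 : 0 < List.count "-" (chars.map (fun c => if pvAlnum.contains c then "+" else "-")) := by
          rw [← PySem.List.count_eq, count_check _ _ _ hbeq_minus chars, h2]; norm_num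
        exact List.count_pos_iff.mp h0
      simp only [hne1, Bool.false_eq_true, if_false]
      rw [pvScanA_eq _ "-", if_pos hmem, index?_map_check _ _ _ hbeq_minus chars, hk]
      simp [h2, hmin1, pvFIdx, hk]
    · have hne2 : (chars.countP (fun c => !pvP c) == 1) = false := by simpa using h2
      have hmin2 : (min ((chars.countP (fun c => !pvP c) : Int)) 2 == 1) = false := by
        simp only [beq_eq_false_iff_ne, ne_eq]
        omega
      simp [hne1, hne2, hmin1, hmin2]
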